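-- pv_equiv track=rewrite | github.com/injahu1/Retos_Phyton | Reto3.py | numero_diast
-- ===== SOURCE A (Python) =====
-- def numero_diast(me):
--     cont=d=0
--     for i in range (me):
--         if i==2:
--             d=29
--         elif i==4 or i==6 or i==9 or i==11:
--             d=30
--         elif i==1 or i==3 or i==5 or i==7 or i==8 or i==10 or i==12:
--             d=31
--         cont=cont+d
--     return(cont)
-- ===== SOURCE B (Python) =====
-- def numero_diast(me):
--     # Count every month at full length, then subtract the fixed corrections
--     # for February and for the four shorter months already passed.
--     if me <= 1:
--         return 0
--     short = sum(1 for m in (4, 6, 9, 11) if m < me)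
--     feb = 2 if me > 2 else 0
--     return 31 * (me - 1) - short - feb
-- ===== Notes on version B (the rewrite author's own statement) =====
-- stated objective: faster
-- what changed: replaced the linear accumulation loop by a closed-form count: a full month's length times the number of counted months, minus fixed corrections for February and for the shorter months already passed
import Mathlib
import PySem

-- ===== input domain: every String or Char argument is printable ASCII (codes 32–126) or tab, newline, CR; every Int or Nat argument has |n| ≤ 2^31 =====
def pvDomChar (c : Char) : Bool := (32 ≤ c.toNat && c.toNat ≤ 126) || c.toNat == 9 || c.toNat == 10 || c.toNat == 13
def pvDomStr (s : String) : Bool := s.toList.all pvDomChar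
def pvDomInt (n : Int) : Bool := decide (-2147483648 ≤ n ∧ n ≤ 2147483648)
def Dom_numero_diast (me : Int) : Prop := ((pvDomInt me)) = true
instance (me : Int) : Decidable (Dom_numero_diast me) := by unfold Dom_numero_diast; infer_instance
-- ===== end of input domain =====

-- B replaces A's linear accumulation loop by a closed-form count: a full month's length per
-- counted month, minus fixed corrections for February and the shorter months passed (objective: faster).

-- ===== PORT A =====
-- loop body of A: state (cont, d), one iteration for each i of range(me)
def pvStepA (s : Int × Int) (i : Int) : Int × Int :=
  let d : Int :=
    if i = 2 then 29
    else if i = 4 ∨ i = 6 ∨ i = 9 ∨ i = 11 then 30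
    else if i = 1 ∨ i = 3 ∨ i = 5 ∨ i = 7 ∨ i = 8 ∨ i = 10 ∨ i = 12 then 31
    else s.2
  (s.1 + d, d)

def numero_diast (me : Int) : Int :=
  ((PySem.List.pyRange 0 me 1).foldl pvStepA (0, 0)).1

-- ===== PORT B =====
def numero_diast_alt (me : Int) : Int :=
  if me ≤ 1 then 0
  else
    -- sum(1 for m in (4, 6, 9, 11) if m < me)
    let short : Int := (([4, 6, 9, 11] : List Int).filter (fun m => m < me)).length
    let feb : Int := if 2 < me then 2 else 0
    31 * (me - 1) - short - feb

-- ===== PRECONDITION & SPEC =====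
def Spec_numero_diast (me : Int) (out : Int) : Prop := out = numero_diast_alt me
instance (me : Int) (out : Int) : Decidable (Spec_numero_diast me out) := by unfold Spec_numero_diast; infer_instance

-- ===== CLAIM (what is proved, stated in full; the proofs are below) =====
def Claim_equal_numero_diast : Prop := ∀ (me : Int), Dom_numero_diast me → Spec_numero_diast me (numero_diast me)

-- ===== LEMMAS AND PROOFS =====
-- after the first 13 iterations A's state is (366, 31) and each later iteration adds 31
theorem pvFoldA_tail (k : Nat) :
    ((PySem.List.pyRange 0 (13 + (k : Int)) 1).foldl pvStepA (0, 0)) = (366 + 31 * (k : Int), 31) := by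
  induction k with
  | zero => decide
  | succ n ih =>
    have hc : (13 : Int) + ((n + 1 : Nat) : Int) = (13 + (n : Int)) + 1 := by push_cast; ring
    rw [hc, PySem.List.pyRange_one_succ_right (by omega : (0 : Int) ≤ 13 + (n : Int)),
        List.foldl_append, ih]
    simp only [List.foldl, pvStepA]
    rw [if_neg (by omega), if_neg (by omega), if_neg (by omega)]
    simp only [Nat.cast_add, Nat.cast_one]
    ring_nf

-- ===== VERDICT (by name: the statement is the Claim_ definition above) =====
theorem numero_diast_spec : Claim_equal_numero_diast := by
  intro me _
  unfold Spec_numero_diast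
  by_cases h0 : me ≤ 0
  · rw [numero_diast, PySem.List.pyRange_one_eq_nil h0]
    rw [numero_diast_alt, if_pos (by omega)]
    rfl
  · by_cases h13 : me ≤ 13
    · have h1 : (1 : Int) ≤ me := by omega
      interval_cases me <;> decide
    · have hme : me = 13 + ((me - 13).toNat : Int) := by omega
      rw [hme, numero_diast, pvFoldA_tail]
      rw [numero_diast_alt, if_neg (by omega)]
      have h4 : (4 : Int) < 13 + ((me - 13).toNat : Int) := by omega
      have h6 : (6 : Int) < 13 + ((me - 13).toNat : Int) := by omega
      have h9 : (9 : Int) < 13 + ((me - 13).toNat : Int) := by omega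
      have h11 : (11 : Int) < 13 + ((me - 13).toNat : Int) := by omega
      have h2 : (2 : Int) < 13 + ((me - 13).toNat : Int) := by omega
      simp only [List.filter, h4, h6, h9, h11, if_pos h2, decide_true]
      simp only [List.length]
      push_cast
      ring
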